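-- pv_equiv track=rewrite | github.com/Bhumika2006-hue/GFG-Code-by-Bhumi | Difficulty: Medium/Maximum People Visible in a Line/maximum-people-visible-in-a-line.py | maxPeople
-- ===== SOURCE A (Python) =====
-- def maxPeople(arr):
--     n = len(arr)
--     if n == 0: return 0
--
--     # left[i] will store the index of the nearest element to the left
--     # that is >= arr[i]. If none, -1.
--     left = [-1] * n
--     stack = []
--     for i in range(n):
--         while stack and arr[stack[-1]] < arr[i]:
--             stack.pop()
--         if stack:
--             left[i] = stack[-1]
--         stack.append(i)
--
--     # right[i] will store the index of the nearest element to the right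
--     # that is >= arr[i]. If none, n.
--     right = [n] * n
--     stack = []
--     for i in range(n - 1, -1, -1):
--         while stack and arr[stack[-1]] < arr[i]:
--             stack.pop()
--         if stack:
--             right[i] = stack[-1]
--         stack.append(i)
--
--     # The number of people person i sees is (right[i] - 1) - (left[i] + 1) + 1
--     # which simplifies to: right[i] - left[i] - 1
--     max_visible = 0
--     for i in range(n):
--         # The count includes self, plus everyone between left[i] and right[i]
--         current_count = right[i] - left[i] - 1
--         if current_count > max_visible:
--             max_visible = current_count
--
--     return max_visible
-- ===== SOURCE B (Python) =====
-- def maxPeople(arr):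
--     n = len(arr)
--     best = 0
--     for i in range(n):
--         l = i - 1
--         while l >= 0 and arr[l] < arr[i]:
--             l -= 1
--         r = i + 1
--         while r < n and arr[r] < arr[i]:
--             r += 1
--         if r - l - 1 > best:
--             best = r - l - 1
--     return best
-- ===== Notes on version B (the rewrite author's own statement) =====
-- stated objective: simpler
-- what changed: Replaced the two monotonic-stack passes plus the boundary-array max pass with a single loop that, for each index, expands left and right while elements are strictly smaller and updates the running maximum directly.
import Mathlib
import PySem

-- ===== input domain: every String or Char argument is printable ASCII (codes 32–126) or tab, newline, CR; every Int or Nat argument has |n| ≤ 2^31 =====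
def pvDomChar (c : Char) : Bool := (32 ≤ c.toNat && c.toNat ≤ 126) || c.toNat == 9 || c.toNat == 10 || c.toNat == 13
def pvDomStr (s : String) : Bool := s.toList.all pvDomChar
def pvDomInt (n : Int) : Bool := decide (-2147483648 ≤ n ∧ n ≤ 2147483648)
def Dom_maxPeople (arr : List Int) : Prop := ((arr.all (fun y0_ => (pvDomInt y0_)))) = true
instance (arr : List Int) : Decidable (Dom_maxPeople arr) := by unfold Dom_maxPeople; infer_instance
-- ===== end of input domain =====

-- B replaces A's two monotonic-stack passes with a direct outward expansion per index;
-- objective: simpler (no speed claim — B is quadratic in the worst case, A is linear).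

-- ===== PORT A =====
-- the inner 'while stack and arr[stack[-1]] < arr[i]: stack.pop()' loop (stack top = head)
def popA (arr : List Int) (v : Int) : List Nat → List Nat
  | [] => []
  | j :: rest => if arr.getD j 0 < v then popA arr v rest else j :: rest

-- one iteration of the first (left) for-loop: state = (left values so far, stack)
def stepL (arr : List Int) (st : List Int × List Nat) (i : Nat) : List Int × List Nat :=
  let s := popA arr (arr.getD i 0) st.2
  let v : Int := match s with | [] => -1 | j :: _ => (j : Int)
  (st.1 ++ [v], i :: s)

-- one iteration of the second (right) for-loop, which runs i = n-1 .. 0 and fills right[i]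
def stepR (arr : List Int) (n : Nat) (st : List Int × List Nat) (i : Nat) : List Int × List Nat :=
  let s := popA arr (arr.getD i 0) st.2
  let v : Int := match s with | [] => (n : Int) | j :: _ => (j : Int)
  (v :: st.1, i :: s)

def maxPeople (arr : List Int) : Int :=
  let n := arr.length
  if n = 0 then 0
  else
    let left := ((List.range n).foldl (stepL arr) ([], [])).1
    let right := ((List.range n).reverse.foldl (stepR arr n) ([], [])).1
    (List.range n).foldl (fun m i =>
      let c := right.getD i 0 - left.getD i 0 - 1
      if c > m then c else m) 0

-- ===== PORT B =====
-- 'l = i - 1; while l >= 0 and arr[l] < v: l -= 1'; argument is l + 1 as a Nat, returns l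
def goL (arr : List Int) (v : Int) : Nat → Int
  | 0 => -1
  | k + 1 => if arr.getD k 0 < v then goL arr v k else (k : Int)

-- 'r = i + 1; while r < n and arr[r] < v: r += 1', returns r
def goR (arr : List Int) (v : Int) (n : Nat) (r : Nat) : Int :=
  if h : r < n then
    if arr.getD r 0 < v then goR arr v n (r + 1) else (r : Int)
  else (r : Int)
termination_by n - r

def maxPeople_alt (arr : List Int) : Int :=
  (List.range arr.length).foldl (fun best i =>
    let l := goL arr (arr.getD i 0) i
    let r := goR arr (arr.getD i 0) arr.length (i + 1)
    if r - l - 1 > best then r - l - 1 else best) 0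

-- ===== PRECONDITION & SPEC =====
def Spec_maxPeople (arr : List Int) (out : Int) : Prop := out = maxPeople_alt arr
instance (arr : List Int) (out : Int) : Decidable (Spec_maxPeople arr out) := by unfold Spec_maxPeople; infer_instance

-- ===== CLAIM (what is proved, stated in full; the proofs are below) =====
def Claim_equal_maxPeople : Prop := ∀ (arr : List Int), Dom_maxPeople arr → Spec_maxPeople arr (maxPeople arr)

-- ===== LEMMAS AND PROOFS =====

-- A's stack after the left loop has processed indices 0 .. i-1
def stkL (arr : List Int) : Nat → List Nat
  | 0 => []
  | i + 1 => i :: popA arr (arr.getD i 0) (stkL arr i)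

-- A's stack after the right loop has processed indices n-1 .. j
def stkR (arr : List Int) (n : Nat) (j : Nat) : List Nat :=
  if _h : j < n then j :: popA arr (arr.getD j 0) (stkR arr n (j + 1)) else []
termination_by n - j

def headL : List Nat → Int
  | [] => -1
  | j :: _ => (j : Int)

def headR (n : Nat) : List Nat → Int
  | [] => (n : Int)
  | j :: _ => (j : Int)

theorem popA_cons (arr : List Int) (v : Int) (j : Nat) (s : List Nat) :
    popA arr v (j :: s) = if arr.getD j 0 < v then popA arr v s else j :: s := rfl

theorem stkR_pos (arr : List Int) (n j : Nat) (hj : j < n) :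
    stkR arr n j = j :: popA arr (arr.getD j 0) (stkR arr n (j + 1)) := by
  rw [stkR]; rw [dif_pos hj]

theorem stkR_nil (arr : List Int) (n j : Nat) (hj : ¬ j < n) :
    stkR arr n j = [] := by
  rw [stkR]; rw [dif_neg hj]

theorem goR_unfold (arr : List Int) (v : Int) (n r : Nat) :
    goR arr v n r = if r < n then (if arr.getD r 0 < v then goR arr v n (r + 1) else (r : Int)) else (r : Int) := by
  rw [goR]; rw [dite_eq_ite]

theorem popA_popA (arr : List Int) (v w : Int) (s : List Nat) (h : w ≤ v) :
    popA arr v (popA arr w s) = popA arr v s := by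
  induction s with
  | nil => rfl
  | cons j rest ih =>
    by_cases h1 : arr.getD j 0 < w
    · rw [popA_cons, if_pos h1, ih, popA_cons, if_pos (lt_of_lt_of_le h1 h)]
    · rw [popA_cons, if_neg h1]

theorem popL_head (arr : List Int) (v : Int) :
    ∀ i, headL (popA arr v (stkL arr i)) = goL arr v i := by
  intro i
  induction i with
  | zero => rfl
  | succ i ih =>
    show headL (popA arr v (i :: popA arr (arr.getD i 0) (stkL arr i))) = goL arr v (i + 1)
    by_cases h : arr.getD i 0 < v
    · rw [popA_cons, if_pos h, popA_popA arr v _ _ (le_of_lt h), ih]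
      show goL arr v i = if arr.getD i 0 < v then goL arr v i else (i : Int)
      rw [if_pos h]
    · rw [popA_cons, if_neg h]
      show (i : Int) = if arr.getD i 0 < v then goL arr v i else (i : Int)
      rw [if_neg h]

theorem popR_head (arr : List Int) (v : Int) (n : Nat) :
    ∀ k j, j ≤ n → n - j = k → headR n (popA arr v (stkR arr n j)) = goR arr v n j := by
  intro k
  induction k with
  | zero =>
    intro j hle h0
    have hj : j = n := by omega
    rw [hj, stkR_nil arr n n (by omega), goR_unfold, if_neg (by omega)]
    rfl
  | succ k ih =>
    intro j hle hk
    have hj : j < n := by omega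
    rw [stkR_pos arr n j hj]
    by_cases h : arr.getD j 0 < v
    · rw [popA_cons, if_pos h, popA_popA arr v _ _ (le_of_lt h),
        ih (j + 1) (by omega) (by omega), goR_unfold arr v n j, if_pos hj, if_pos h]
    · rw [popA_cons, if_neg h, goR_unfold arr v n j, if_pos hj, if_neg h]
      rfl

theorem foldL_eq (arr : List Int) :
    ∀ m, (List.range m).foldl (stepL arr) ([], []) =
      ((List.range m).map (fun j => goL arr (arr.getD j 0) j), stkL arr m) := by
  intro m
  induction m with
  | zero => rfl
  | succ m ih =>
    rw [List.range_succ, List.foldl_append, ih]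
    simp only [List.foldl_cons, List.foldl_nil, List.map_append, List.map_cons, List.map_nil]
    unfold stepL
    have hv : (match popA arr (arr.getD m 0) (stkL arr m) with
        | [] => (-1 : Int) | j :: _ => (j : Int)) = headL (popA arr (arr.getD m 0) (stkL arr m)) := by
      cases popA arr (arr.getD m 0) (stkL arr m) <;> rfl
    simp only [hv, popL_head]
    rfl

theorem foldR_eq (arr : List Int) (n : Nat) :
    ∀ k j, j ≤ n → n - j = k →
      ((List.range' j (n - j)).reverse).foldl (stepR arr n) ([], []) =
        ((List.range' j (n - j)).map (fun i => goR arr (arr.getD i 0) n (i + 1)), stkR arr n j) := by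
  intro k
  induction k with
  | zero =>
    intro j hle h0
    have hj : j = n := by omega
    rw [hj, Nat.sub_self, stkR_nil arr n n (by omega)]
    rfl
  | succ k ih =>
    intro j hle hk
    have hj : j < n := by omega
    rw [hk, List.range'_succ, List.reverse_cons, List.foldl_append]
    have hk' : n - (j + 1) = k := by omega
    rw [show k = n - (j + 1) by omega, ih (j + 1) (by omega) (by omega)]
    simp only [List.foldl_cons, List.foldl_nil, List.map_cons]
    unfold stepR
    have hv : (match popA arr (arr.getD j 0) (stkR arr n (j + 1)) with
        | [] => (n : Int) | i :: _ => (i : Int)) = headR n (popA arr (arr.getD j 0) (stkR arr n (j + 1))) := by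
      cases popA arr (arr.getD j 0) (stkR arr n (j + 1)) <;> rfl
    simp only [hv, popR_head arr (arr.getD j 0) n (n - (j + 1)) (j + 1) (by omega) rfl]
    rw [← stkR_pos arr n j hj]

-- ===== VERDICT (by name: the statement is the Claim_ definition above) =====
theorem maxPeople_spec : Claim_equal_maxPeople := by
  intro arr _
  unfold Spec_maxPeople maxPeople maxPeople_alt
  by_cases hn : arr.length = 0
  · simp [hn]
  · simp only [hn, if_false]
    have hR := foldR_eq arr arr.length (arr.length - 0) 0 (Nat.zero_le _) rfl
    rw [Nat.sub_zero, ← List.range_eq_range'] at hR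
    rw [hR, foldL_eq arr arr.length]
    simp only
    apply PySem.List.foldl_congr_mem
    intro acc i hi
    have hin : i < arr.length := List.mem_range.mp hi
    rw [PySem.List.getD_map_range _ _ _ _ hin, PySem.List.getD_map_range _ _ _ _ hin]
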